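-- pv_equiv track=rewrite | github.com/Bonioszko/studia | ptsz/zadanie2/weryfikator.py | calculate_criterium
-- ===== SOURCE A (Python) =====
-- def calculate_criterium(sequences, task_durations, deadlines, penalties):
--     total_penalty = 0
--     for machine_seq in sequences:
--         current_time = 0
--         for task_index ,task in enumerate( machine_seq):
--             task = int(task) -1
--             duration = task_durations[task][task_index]
--             deadline = deadlines[task_index]
--             penalty = penalties[task_index]
--
--             current_time += duration
--             delay = max(0, current_time - deadline)
--             total_penalty += delay * penalty
--
--     return total_penalty
-- ===== SOURCE B (Python) =====
-- def calculate_criterium(sequences, task_durations, deadlines, penalties):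
--     def machine_penalty(seq):
--         durations = [task_durations[int(t) - 1][i] for i, t in enumerate(seq)]
--         return sum(max(0, sum(durations[:i + 1]) - deadlines[i]) * penalties[i]
--                    for i in range(len(seq)))
--     return sum(machine_penalty(seq) for seq in sequences)
-- ===== Notes on version B (the rewrite author's own statement) =====
-- stated objective: alternative
-- what changed: A's single pass threading a (current_time, total_penalty) accumulator through nested for-loops is replaced by a per-machine map/reduce: a durations table built by comprehension, completion times recomputed as prefix-slice sums, and the weighted tardiness summed over positions with sum().
import Mathlib
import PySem

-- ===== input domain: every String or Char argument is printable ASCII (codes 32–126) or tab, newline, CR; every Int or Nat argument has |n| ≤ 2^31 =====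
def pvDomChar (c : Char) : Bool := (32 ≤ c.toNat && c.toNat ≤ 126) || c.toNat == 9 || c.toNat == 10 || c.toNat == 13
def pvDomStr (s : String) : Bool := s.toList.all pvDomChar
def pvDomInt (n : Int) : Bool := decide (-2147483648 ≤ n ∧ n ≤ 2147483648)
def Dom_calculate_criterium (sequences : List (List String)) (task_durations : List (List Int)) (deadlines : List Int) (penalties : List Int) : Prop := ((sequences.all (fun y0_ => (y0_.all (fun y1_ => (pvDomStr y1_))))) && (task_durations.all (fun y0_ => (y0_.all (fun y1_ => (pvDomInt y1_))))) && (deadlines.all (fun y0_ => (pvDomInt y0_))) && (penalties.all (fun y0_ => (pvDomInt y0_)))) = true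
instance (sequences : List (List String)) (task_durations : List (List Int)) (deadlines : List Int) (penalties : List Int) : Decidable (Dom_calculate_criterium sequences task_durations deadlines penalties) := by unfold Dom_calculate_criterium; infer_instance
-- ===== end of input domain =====

-- B replaces A's running-accumulator double loop by a per-machine map/sum decomposition
-- (durations table, then prefix-slice sums); objective: alternative structure, no speed claim.

-- ===== PORT A =====
-- the inner loop body of A, one step of the (current_time, total_penalty) state
def pvStepA (task_durations : List (List Int)) (deadlines : List Int) (penalties : List Int)
    (st : Int × Int) (p : Int × String) : Int × Int :=
  let task := (PySem.Int.ofStr? p.2).getD 0 - 1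
  let duration := PySem.List.pyGetD (PySem.List.pyGetD task_durations task []) p.1 0
  let deadline := PySem.List.pyGetD deadlines p.1 0
  let penalty := PySem.List.pyGetD penalties p.1 0
  let current_time := st.1 + duration
  (current_time, st.2 + max 0 (current_time - deadline) * penalty)

def calculate_criterium (sequences : List (List String)) (task_durations : List (List Int)) (deadlines : List Int) (penalties : List Int) : Int :=
  sequences.foldl
    (fun total_penalty machine_seq =>
      ((PySem.List.enumerate machine_seq 0).foldl
        (pvStepA task_durations deadlines penalties) (0, total_penalty)).2)
    0

-- ===== PORT B =====
-- durations[i] of B's comprehension: task_durations[int(t)-1][i]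
def pvDur (task_durations : List (List Int)) (p : Int × String) : Int :=
  PySem.List.pyGetD (PySem.List.pyGetD task_durations ((PySem.Int.ofStr? p.2).getD 0 - 1) []) p.1 0

def pvMachinePenalty (task_durations : List (List Int)) (deadlines : List Int) (penalties : List Int)
    (seq : List String) : Int :=
  ((PySem.List.pyRange 0 (seq.length : Int) 1).map (fun i =>
      max 0 ((PySem.List.slice ((PySem.List.enumerate seq 0).map (pvDur task_durations)) none (some (i + 1))).sum
              - PySem.List.pyGetD deadlines i 0)
        * PySem.List.pyGetD penalties i 0)).sum

def calculate_criterium_alt (sequences : List (List String)) (task_durations : List (List Int)) (deadlines : List Int) (penalties : List Int) : Int :=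
  (sequences.map (pvMachinePenalty task_durations deadlines penalties)).sum

-- ===== PRECONDITION & SPEC =====
-- Pre_ = exactly the inputs where the Python A returns: every scheduled task name parses as an
-- int and all four indexings are in range (otherwise A raises ValueError/IndexError).
def Pre_calculate_criterium (sequences : List (List String)) (task_durations : List (List Int)) (deadlines : List Int) (penalties : List Int) : Prop :=
  ∀ seq ∈ sequences, ∀ p ∈ PySem.List.enumerate seq 0,
    (PySem.Int.ofStr? p.2).isSome ∧
    PySem.Raise.InRange task_durations.length ((PySem.Int.ofStr? p.2).getD 0 - 1) ∧
    PySem.Raise.InRange (PySem.List.pyGetD task_durations ((PySem.Int.ofStr? p.2).getD 0 - 1) []).length p.1 ∧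
    PySem.Raise.InRange deadlines.length p.1 ∧
    PySem.Raise.InRange penalties.length p.1
instance (sequences : List (List String)) (task_durations : List (List Int)) (deadlines : List Int) (penalties : List Int) : Decidable (Pre_calculate_criterium sequences task_durations deadlines penalties) := by unfold Pre_calculate_criterium; infer_instance

def pvWitness_calculate_criterium : List (List String) × List (List Int) × List Int × List Int :=
  ([["1", "2"], ["2", "1"]], [[2, 3], [1, 4]], [1, 3], [2, 5])

def Spec_calculate_criterium (sequences : List (List String)) (task_durations : List (List Int)) (deadlines : List Int) (penalties : List Int) (out : Int) : Prop := out = calculate_criterium_alt sequences task_durations deadlines penalties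
instance (sequences : List (List String)) (task_durations : List (List Int)) (deadlines : List Int) (penalties : List Int) (out : Int) : Decidable (Spec_calculate_criterium sequences task_durations deadlines penalties out) := by unfold Spec_calculate_criterium; infer_instance

-- ===== CLAIM (what is proved, stated in full; the proofs are below) =====
def Claim_equal_calculate_criterium : Prop := ∀ (sequences : List (List String)) (task_durations : List (List Int)) (deadlines : List Int) (penalties : List Int), Dom_calculate_criterium sequences task_durations deadlines penalties → Pre_calculate_criterium sequences task_durations deadlines penalties → Spec_calculate_criterium sequences task_durations deadlines penalties (calculate_criterium sequences task_durations deadlines penalties)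

-- ===== LEMMAS AND PROOFS =====

-- common reference for both machine loops: structural recursion on the duration list,
-- consuming deadlines/penalties from the front, threading the completion time c
def pvSpecL (ds dl pe : List Int) (c : Int) : Int :=
  match ds, dl, pe with
  | [], _, _ => 0
  | d :: ds', dl, pe =>
      max 0 (c + d - dl.headD 0) * pe.headD 0 + pvSpecL ds' dl.tail pe.tail (c + d)

theorem pv_getD_drop (xs : List Int) (s : Nat) : xs.getD s 0 = (xs.drop s).headD 0 := by
  induction xs generalizing s with
  | nil => simp
  | cons x xs ih =>
    cases s with
    | zero => simp
    | succ n => simp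

theorem pv_innerA (td : List (List Int)) (dl pe : List Int) :
    ∀ (seq : List String) (s : Nat) (c tot : Int),
      ((PySem.List.enumerate seq (s : Int)).foldl (pvStepA td dl pe) (c, tot)).2
        = tot + pvSpecL ((PySem.List.enumerate seq (s : Int)).map (pvDur td)) (dl.drop s) (pe.drop s) c := by
  intro seq
  induction seq with
  | nil => intro s c tot; simp [PySem.List.enumerate_nil, pvSpecL]
  | cons t rest ih =>
    intro s c tot
    rw [PySem.List.enumerate_cons]
    have hs1 : (s : Int) + 1 = ((s + 1 : Nat) : Int) := by push_cast; ring
    simp only [List.foldl_cons, List.map_cons, hs1, ih (s + 1)]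
    simp only [pvStepA, pvSpecL, pvDur, PySem.List.pyGetD_natCast,
      pv_getD_drop dl s, pv_getD_drop pe s, List.tail_drop]
    ring

theorem pv_getD_succ_tail (xs : List Int) (k : Nat) : xs.getD (k + 1) 0 = xs.tail.getD k 0 := by
  cases xs <;> simp

theorem pv_rangeSum (ds : List Int) :
    ∀ (dl pe : List Int) (c : Int),
      ((List.range ds.length).map (fun k =>
          max 0 (c + ((ds.take (k + 1)).sum) - dl.getD k 0) * pe.getD k 0)).sum
        = pvSpecL ds dl pe c := by
  induction ds with
  | nil => intro dl pe c; simp [pvSpecL]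
  | cons d ds' ih =>
    intro dl pe c
    rw [List.length_cons, List.range_succ_eq_map, List.map_cons, List.map_map, List.sum_cons]
    simp only [pvSpecL]
    have : ((List.range ds'.length).map ((fun k =>
        max 0 (c + ((d :: ds').take (k + 1)).sum - dl.getD k 0) * pe.getD k 0) ∘ Nat.succ)).sum
        = ((List.range ds'.length).map (fun k =>
        max 0 ((c + d) + (ds'.take (k + 1)).sum - dl.tail.getD k 0) * pe.tail.getD k 0)).sum := by
      apply congrArg
      apply List.map_congr_left
      intro k _
      simp only [Function.comp, List.take_succ_cons, List.sum_cons,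
        pv_getD_succ_tail dl k, pv_getD_succ_tail pe k]
      ring_nf
    rw [this, ih dl.tail pe.tail (c + d)]
    cases dl <;> cases pe <;> simp

theorem pv_machineB (td : List (List Int)) (dl pe : List Int) (seq : List String) :
    pvMachinePenalty td dl pe seq
      = pvSpecL ((PySem.List.enumerate seq 0).map (pvDur td)) dl pe 0 := by
  unfold pvMachinePenalty
  set ds := (PySem.List.enumerate seq 0).map (pvDur td) with hds
  have hlen : ds.length = seq.length := by
    simp [hds, PySem.List.length_enumerate]
  rw [show ((seq.length : Int)) = ((ds.length : Nat) : Int) by rw [hlen],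
    PySem.List.pyRange_zero_natCast, List.map_map]
  rw [← pv_rangeSum ds dl pe 0]
  apply congrArg
  apply List.map_congr_left
  intro k _
  have h1 : ((k : Int) + 1) = ((k + 1 : Nat) : Int) := by push_cast; ring
  simp only [Function.comp, h1, PySem.List.slice_to_natCast, PySem.List.pyGetD_natCast]
  ring_nf

-- ===== VERDICT (by name: the statement is the Claim_ definition above) =====
theorem calculate_criterium_spec : Claim_equal_calculate_criterium := by
  intro sequences td dl pe _ _
  unfold Spec_calculate_criterium calculate_criterium calculate_criterium_alt
  have hM : ∀ (tot : Int) (seq : List String),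
      ((PySem.List.enumerate seq 0).foldl (pvStepA td dl pe) (0, tot)).2
        = tot + pvMachinePenalty td dl pe seq := by
    intro tot seq
    have h := pv_innerA td dl pe seq 0 0 tot
    simpa [pv_machineB] using h
  rw [show (fun total_penalty machine_seq =>
        ((PySem.List.enumerate machine_seq 0).foldl (pvStepA td dl pe) ((0 : Int), total_penalty)).2)
      = (fun total_penalty machine_seq => total_penalty + pvMachinePenalty td dl pe machine_seq)
    from funext fun t => funext fun q => hM t q]
  simpa using PySem.List.foldl_add (pvMachinePenalty td dl pe) (l := sequences) (a := 0)
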